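-- pv_equiv track=rewrite | github.com/kurt-stolle/unipercept | sources/unipercept/nn/layers/deform_attn/_mod.py | _lookup_forward_stride_thread
-- ===== SOURCE A (Python) =====
-- def _get_factors(N):
--     res = []
--     for i in range(1, N + 1):
--         if N % i == 0:
--             res.append(i)
--     return res
--
-- def _lookup_forward_stride_thread(B, Q, G, C):
--     d_stride = 8
--     ms = _get_factors(B * Q)
--     multiplier = 1
--     for m in ms:
--         if m <= 64 and (m * G * C // d_stride) <= 512:
--             multiplier = m
--     n_thread = multiplier * G * C // d_stride
--     return d_stride, n_thread
-- ===== SOURCE B (Python) =====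
-- def _lookup_forward_stride_thread(B, Q, G, C):
--     d_stride = 8
--     N = B * Q
--     # collect all divisors of N by trial division up to sqrt(N);
--     # empty when N <= 0 (matching range(1, N+1) being empty)
--     divs = []
--     i = 1
--     while i * i <= N:
--         if N % i == 0:
--             divs.append(i)
--             j = N // i
--             if j != i:
--                 divs.append(j)
--         i += 1
--     valid = [d for d in divs if d <= 64 and d * G * C // d_stride <= 512]
--     multiplier = max(valid, default=1)
--     return d_stride, multiplier * G * C // d_stride
-- ===== Notes on version B (the rewrite author's own statement) =====
-- stated objective: faster
-- what changed: Replaces the O(N) enumeration of all candidates 1..N=B*Q followed by a last-match selection scan with O(sqrt(N)) trial division collecting divisor pairs (i, N//i), then takes the maximum valid divisor via max(..., default=1) instead of keeping the last match.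
import Mathlib
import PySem

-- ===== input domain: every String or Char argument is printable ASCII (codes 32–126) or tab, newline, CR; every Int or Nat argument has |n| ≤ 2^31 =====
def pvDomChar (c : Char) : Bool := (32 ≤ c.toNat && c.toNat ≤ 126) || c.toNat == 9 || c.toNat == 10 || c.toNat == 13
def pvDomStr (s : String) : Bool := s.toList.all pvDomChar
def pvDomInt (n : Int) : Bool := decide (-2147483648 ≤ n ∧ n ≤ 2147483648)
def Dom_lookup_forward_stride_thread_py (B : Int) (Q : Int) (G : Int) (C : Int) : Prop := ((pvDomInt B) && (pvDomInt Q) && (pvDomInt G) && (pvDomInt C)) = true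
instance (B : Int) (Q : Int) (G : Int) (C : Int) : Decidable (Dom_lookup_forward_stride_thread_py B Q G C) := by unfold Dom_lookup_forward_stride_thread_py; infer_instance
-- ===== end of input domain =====

-- B replaces A's O(B*Q) enumeration of all candidates with O(sqrt(B*Q)) trial division collecting divisor pairs, then takes the maximum valid divisor (default 1) instead of a last-match scan (faster).


-- ===== PORT A =====
-- port of _get_factors
def pvGetFactors (N : Int) : List Int :=
  (PySem.List.pyRange 1 (N + 1) 1).foldl
    (fun res i => if PySem.Int.mod N i = 0 then res ++ [i] else res) []

def lookup_forward_stride_thread_py (B : Int) (Q : Int) (G : Int) (C : Int) : List Int :=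
  let d_stride : Int := 8
  let ms := pvGetFactors (B * Q)
  let multiplier :=
    ms.foldl (fun mult m =>
      if m ≤ 64 ∧ PySem.Int.floordiv (m * G * C) d_stride ≤ 512 then m else mult) 1
  [d_stride, PySem.Int.floordiv (multiplier * G * C) d_stride]

-- ===== PORT B =====
-- the while loop 'while i*i <= N: … i += 1' (divisor-pair collection by trial division);
-- structural recursion on a fuel that bounds the remaining iterations (N + 1 - i), so the
-- kernel can evaluate it; the loop body is transcribed step for step
def pvCollectDivsAux : Nat → Int → Int → List Int
  | 0, _, _ => []
  | fuel + 1, N, i =>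
    if i * i ≤ N then
      (if PySem.Int.mod N i = 0 then
         i :: (if PySem.Int.floordiv N i ≠ i then [PySem.Int.floordiv N i] else [])
       else []) ++ pvCollectDivsAux fuel N (i + 1)
    else []

def pvCollectDivs (N : Int) (i : Int) : List Int :=
  pvCollectDivsAux (N + 1 - i).toNat N i

def lookup_forward_stride_thread_py_alt (B : Int) (Q : Int) (G : Int) (C : Int) : List Int :=
  let d_stride : Int := 8
  let N := B * Q
  let divs := pvCollectDivs N 1
  let valid := divs.filter (fun d =>
    decide (d ≤ 64) && decide (PySem.Int.floordiv (d * G * C) d_stride ≤ 512))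
  let multiplier := PySem.List.maxD valid (fun x => x) 1
  [d_stride, PySem.Int.floordiv (multiplier * G * C) d_stride]

-- ===== PRECONDITION & SPEC =====
def Spec_lookup_forward_stride_thread_py (B : Int) (Q : Int) (G : Int) (C : Int) (out : List Int) : Prop := out = lookup_forward_stride_thread_py_alt B Q G C
instance (B : Int) (Q : Int) (G : Int) (C : Int) (out : List Int) : Decidable (Spec_lookup_forward_stride_thread_py B Q G C out) := by unfold Spec_lookup_forward_stride_thread_py; infer_instance

-- ===== CLAIM (what is proved, stated in full; the proofs are below) =====
def Claim_equal_lookup_forward_stride_thread_py : Prop := ∀ (B : Int) (Q : Int) (G : Int) (C : Int), Dom_lookup_forward_stride_thread_py B Q G C → Spec_lookup_forward_stride_thread_py B Q G C (lookup_forward_stride_thread_py B Q G C)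

-- ===== LEMMAS AND PROOFS =====

-- the last-match fold: its result is the init or a member satisfying q
theorem pickLast_mem (q : Int → Prop) [DecidablePred q] (l : List Int) (a : Int) :
    l.foldl (fun acc m => if q m then m else acc) a = a ∨
      (l.foldl (fun acc m => if q m then m else acc) a ∈ l ∧
       q (l.foldl (fun acc m => if q m then m else acc) a)) := by
  induction l generalizing a with
  | nil => exact Or.inl rfl
  | cons x xs ih =>
    simp only [List.foldl_cons]
    by_cases hx : q x
    · rw [if_pos hx]
      rcases ih x with h | ⟨h1, h2⟩
      · exact Or.inr ⟨by rw [h]; exact List.mem_cons_self, by rw [h]; exact hx⟩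
      · exact Or.inr ⟨List.mem_cons_of_mem _ h1, h2⟩
    · rw [if_neg hx]
      rcases ih a with h | ⟨h1, h2⟩
      · exact Or.inl h
      · exact Or.inr ⟨List.mem_cons_of_mem _ h1, h2⟩

-- the init is a lower bound of the result when it bounds all elements
theorem pickLast_init_le (q : Int → Prop) [DecidablePred q] (l : List Int) (a : Int)
    (h : ∀ m ∈ l, a ≤ m) :
    a ≤ l.foldl (fun acc m => if q m then m else acc) a := by
  rcases pickLast_mem q l a with he | ⟨h1, _⟩
  · omega
  · exact h _ h1

-- on a strictly ascending list, the last match dominates every match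
theorem pickLast_isMax (q : Int → Prop) [DecidablePred q] (l : List Int) (a : Int)
    (hp : l.Pairwise (· < ·)) :
    ∀ m ∈ l, q m → m ≤ l.foldl (fun acc m => if q m then m else acc) a := by
  induction l generalizing a with
  | nil => intro m hm; cases hm
  | cons x xs ih =>
    intro m hm hq
    have hx_lt : ∀ y ∈ xs, x < y := (List.pairwise_cons.1 hp).1
    have hp' : xs.Pairwise (· < ·) := (List.pairwise_cons.1 hp).2
    simp only [List.foldl_cons]
    rcases List.mem_cons.1 hm with rfl | hm'
    · rw [if_pos hq]
      exact pickLast_init_le q xs m (fun y hy => le_of_lt (hx_lt y hy))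
    · by_cases hx : q x
      · rw [if_pos hx]; exact ih x hp' m hm' hq
      · rw [if_neg hx]; exact ih a hp' m hm' hq

-- membership in A's factor list
theorem mem_pvGetFactors (N m : Int) :
    m ∈ pvGetFactors N ↔ 1 ≤ m ∧ m ≤ N ∧ PySem.Int.mod N m = 0 := by
  unfold pvGetFactors
  rw [PySem.List.foldl_append_ite_eq_filter]
  simp only [List.nil_append, List.mem_filter, decide_eq_true_eq,
    PySem.List.mem_pyRange_one]
  constructor
  · rintro ⟨⟨h1, h2⟩, h3⟩; exact ⟨h1, by omega, h3⟩
  · rintro ⟨h1, h2, h3⟩; exact ⟨⟨h1, by omega⟩, h3⟩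

theorem pairwise_pvGetFactors (N : Int) : (pvGetFactors N).Pairwise (· < ·) := by
  unfold pvGetFactors
  rw [PySem.List.foldl_append_ite_eq_filter]
  simpa using (PySem.List.pairwise_lt_pyRange_one 1 (N + 1)).filter _

-- membership in B's trial-division divisor list
theorem mem_pvCollectDivsAux (N m : Int) : ∀ (fuel : Nat) (i : Int), 1 ≤ i →
    N + 1 - i ≤ (fuel : Int) →
    (m ∈ pvCollectDivsAux fuel N i ↔
      ∃ j, i ≤ j ∧ j * j ≤ N ∧ PySem.Int.mod N j = 0 ∧
        (m = j ∨ m = PySem.Int.floordiv N j)) := by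
  intro fuel
  induction fuel with
  | zero =>
    intro i hi hf
    simp only [pvCollectDivsAux, List.not_mem_nil, false_iff]
    rintro ⟨j, hj1, hj2, _, _⟩
    have : j ≤ j * j := by nlinarith
    omega
  | succ fuel ih =>
    intro i hi hf
    simp only [pvCollectDivsAux]
    by_cases h : i * i ≤ N
    · rw [if_pos h, List.mem_append, ih (i + 1) (by omega) (by omega)]
      constructor
      · rintro (hm | ⟨j, hj1, hj2, hj3, hj4⟩)
        · by_cases hd : PySem.Int.mod N i = 0
          · rw [if_pos hd] at hm
            rcases List.mem_cons.1 hm with rfl | hm'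
            · exact ⟨m, le_refl m, h, hd, Or.inl rfl⟩
            · refine ⟨i, le_refl i, h, hd, Or.inr ?_⟩
              by_cases hne : PySem.Int.floordiv N i ≠ i
              · rw [if_pos hne] at hm'; simpa using hm'
              · rw [if_neg hne] at hm'; cases hm'
          · rw [if_neg hd] at hm; cases hm
        · exact ⟨j, by omega, hj2, hj3, hj4⟩
      · rintro ⟨j, hj1, hj2, hj3, hj4⟩
        by_cases hji : j = i
        · subst hji
          left
          rw [if_pos hj3]
          rcases hj4 with rfl | rfl
          · exact List.mem_cons_self
          · by_cases hne : PySem.Int.floordiv N j ≠ j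
            · exact List.mem_cons_of_mem _ (by rw [if_pos hne]; exact List.mem_singleton.2 rfl)
            · rcases not_not.1 hne with hne'; rw [hne']; exact List.mem_cons_self
        · exact Or.inr ⟨j, by omega, hj2, hj3, hj4⟩
    · rw [if_neg h]
      simp only [List.not_mem_nil, false_iff]
      rintro ⟨j, hj1, hj2, _, _⟩
      have : i * i ≤ j * j := by nlinarith
      omega

-- the divisor-pair collection starting at 1 lists exactly the divisors 1..N
theorem mem_pvCollectDivs_one (N m : Int) :
    m ∈ pvCollectDivs N 1 ↔ 1 ≤ m ∧ m ≤ N ∧ PySem.Int.mod N m = 0 := by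
  unfold pvCollectDivs
  rw [mem_pvCollectDivsAux N m (N + 1 - 1).toNat 1 (le_refl 1) (by omega)]
  constructor
  · rintro ⟨j, hj1, hj2, hj3, hj4⟩
    have hjpos : 0 < j := by omega
    have hdvd : j ∣ N := (PySem.Int.mod_eq_zero_iff_dvd N j).1 hj3
    have hNpos : 1 ≤ N := by nlinarith
    rcases hj4 with rfl | rfl
    · exact ⟨hj1, by nlinarith, hj3⟩
    · rw [PySem.Int.floordiv_eq_ediv_of_pos hjpos]
      set k := N / j with hk
      have hmul : j * k = N := Int.mul_ediv_cancel' hdvd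
      have hkpos : 1 ≤ k := by nlinarith
      have hkdvd : k ∣ N := ⟨j, by rw [← hmul]; ring⟩
      refine ⟨hkpos, by nlinarith, ?_⟩
      exact (PySem.Int.mod_eq_zero_iff_dvd N k).2 hkdvd
  · rintro ⟨h1, h2, h3⟩
    have hmpos : 0 < m := by omega
    have hdvd : m ∣ N := (PySem.Int.mod_eq_zero_iff_dvd N m).1 h3
    have hmul : m * (N / m) = N := Int.mul_ediv_cancel' hdvd
    set k := N / m with hk
    by_cases hsq : m * m ≤ N
    · exact ⟨m, h1, hsq, h3, Or.inl rfl⟩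
    · have hkpos : 1 ≤ k := by nlinarith
      have hklt : k < m := by nlinarith
      have hkk : k * k ≤ N := by nlinarith
      have hkdvd : k ∣ N := ⟨m, by nlinarith⟩
      refine ⟨k, hkpos, hkk, (PySem.Int.mod_eq_zero_iff_dvd N k).2 hkdvd, Or.inr ?_⟩
      rw [PySem.Int.floordiv_eq_ediv_of_pos (by omega : (0:Int) < k)]
      have : k * m = N := by nlinarith
      rw [← this, Int.mul_ediv_cancel_left _ (by omega : k ≠ 0)]
  -- (both directions use that divisors pair up as (j, N/j))

-- B's multiplier: characterization of maxD over the filtered divisor list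
theorem maxD_char (l : List Int) (p : Int → Bool) :
    (PySem.List.maxD (l.filter p) (fun x => x) 1 = 1 ∨
      (PySem.List.maxD (l.filter p) (fun x => x) 1 ∈ l ∧
        p (PySem.List.maxD (l.filter p) (fun x => x) 1))) ∧
    (∀ d ∈ l, p d → d ≤ PySem.List.maxD (l.filter p) (fun x => x) 1) := by
  unfold PySem.List.maxD
  rcases hmax : PySem.List.max? (l.filter p) (fun x => x) with _ | m
  · have hnil : l.filter p = [] := (PySem.List.max?_eq_none_iff _ _).1 hmax
    constructor
    · exact Or.inl rfl
    · intro d hd hp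
      have : d ∈ l.filter p := List.mem_filter.2 ⟨hd, hp⟩
      rw [hnil] at this; cases this
  · have hmem : m ∈ l.filter p := PySem.List.max?_mem hmax
    have hmax' := PySem.List.max?_isMax hmax
    constructor
    · exact Or.inr ⟨(List.mem_filter.1 hmem).1, (List.mem_filter.1 hmem).2⟩
    · intro d hd hp
      exact hmax' d (List.mem_filter.2 ⟨hd, hp⟩)

-- the two multiplier computations agree (antisymmetry on the shared characterization)
theorem multiplier_eq (N G C : Int) :
    (pvGetFactors N).foldl (fun mult m =>
        if m ≤ 64 ∧ PySem.Int.floordiv (m * G * C) 8 ≤ 512 then m else mult) 1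
    = PySem.List.maxD
        ((pvCollectDivs N 1).filter (fun d =>
          decide (d ≤ 64) && decide (PySem.Int.floordiv (d * G * C) 8 ≤ 512)))
        (fun x => x) 1 := by
  set q : Int → Prop := fun m => m ≤ 64 ∧ PySem.Int.floordiv (m * G * C) 8 ≤ 512 with hq
  set p : Int → Bool := fun d =>
    decide (d ≤ 64) && decide (PySem.Int.floordiv (d * G * C) 8 ≤ 512) with hp
  have hpq : ∀ d, p d = true ↔ q d := by
    intro d; simp [hp, hq]
  set r₁ := (pvGetFactors N).foldl (fun mult m => if q m then m else mult) 1 with hr₁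
  set r₂ := PySem.List.maxD ((pvCollectDivs N 1).filter p) (fun x => x) 1 with hr₂
  have hchar₂ := maxD_char (pvCollectDivs N 1) p
  have h₁mem := pickLast_mem q (pvGetFactors N) 1
  have h₁max := pickLast_isMax q (pvGetFactors N) 1 (pairwise_pvGetFactors N)
  have hle : r₁ ≤ r₂ := by
    rcases h₁mem with h | ⟨hmem, hqr⟩
    · rw [← hr₁] at h; rw [h]
      rcases hchar₂.1 with h2 | ⟨h2mem, h2p⟩
      · omega
      · have := (mem_pvCollectDivs_one N r₂).1 h2mem; omega
    · rw [← hr₁] at hmem hqr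
      have hdiv := (mem_pvGetFactors N r₁).1 hmem
      exact hchar₂.2 r₁ ((mem_pvCollectDivs_one N r₁).2 hdiv) ((hpq r₁).2 hqr)
  have hge : r₂ ≤ r₁ := by
    rcases hchar₂.1 with h | ⟨h2mem, h2p⟩
    · rw [← hr₂] at h; rw [h]
      rcases h₁mem with h1 | ⟨h1mem, _⟩
      · rw [← hr₁] at h1; omega
      · rw [← hr₁] at h1mem
        have := (mem_pvGetFactors N r₁).1 h1mem; omega
    · rw [← hr₂] at h2mem h2p
      have hdiv := (mem_pvCollectDivs_one N r₂).1 h2mem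
      exact h₁max r₂ ((mem_pvGetFactors N r₂).2 hdiv) ((hpq r₂).1 h2p)
  omega

-- ===== VERDICT (by name: the statement is the Claim_ definition above) =====
theorem lookup_forward_stride_thread_py_spec : Claim_equal_lookup_forward_stride_thread_py := by
  intro B Q G C _
  simp only [Spec_lookup_forward_stride_thread_py, lookup_forward_stride_thread_py,
    lookup_forward_stride_thread_py_alt]
  rw [multiplier_eq (B * Q) G C]
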